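-- pv_equiv track=rewrite | github.com/pypi-data/pypi-mirror-194 | packages/isHex/isHex-1.1.0-py3-none-any.whl/isHex.py | isHexUpper
-- ===== SOURCE A (Python) =====
-- def isHexUpper(string):
--     """
--     Returns True if string is valid hexidecimal with uppercase characters, else returns False.
--     """
--     for character in string:
--         if '0' <= character <= '9':
--             continue
--         if 'A' <= character <= 'F':
--             continue
--         return False
--     return True
-- ===== SOURCE B (Python) =====
-- def isHexUpper(string):
--     """
--     Returns True if string is valid hexidecimal with uppercase characters, else returns False.
--     """
--     if len(string) == 0:
--         return True
--     if len(string) == 1: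
--         return string in '0123456789ABCDEF'
--     mid = len(string) // 2
--     return isHexUpper(string[:mid]) and isHexUpper(string[mid:])
-- ===== Notes on version B (the rewrite author's own statement) =====
-- stated objective: alternative
-- what changed: Replaced the linear early-return per-character scan with a divide-and-conquer recursion: split the string in half, recurse on both halves, a single character is tested by membership in the hex alphabet.
import Mathlib
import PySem

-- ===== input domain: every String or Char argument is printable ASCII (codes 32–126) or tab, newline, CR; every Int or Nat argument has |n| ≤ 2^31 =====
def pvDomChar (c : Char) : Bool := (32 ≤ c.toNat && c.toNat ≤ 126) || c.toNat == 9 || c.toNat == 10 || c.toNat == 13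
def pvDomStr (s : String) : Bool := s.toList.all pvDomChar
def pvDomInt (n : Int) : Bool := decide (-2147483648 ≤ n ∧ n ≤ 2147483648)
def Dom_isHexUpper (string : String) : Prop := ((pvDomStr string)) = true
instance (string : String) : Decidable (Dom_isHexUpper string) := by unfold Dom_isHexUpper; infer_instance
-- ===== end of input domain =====

-- B replaces A's linear early-return scan with a divide-and-conquer recursion on string halves (alternative; not faster).

-- ===== PORT A =====
-- the for-loop with early 'return False' as structural recursion over the characters
def isHexUpperGo : List Char → Bool
  | [] => true
  | c :: rest =>
    if '0' ≤ c ∧ c ≤ '9' then isHexUpperGo rest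
    else if 'A' ≤ c ∧ c ≤ 'F' then isHexUpperGo rest
    else false

def isHexUpper (string : String) : Bool := isHexUpperGo string.toList

-- ===== PORT B =====
-- len 0 → True; len 1 → membership in the hex alphabet; else recurse on the two halves
def isHexUpperAltGo : List Char → Bool
  | [] => true
  | [c] => "0123456789ABCDEF".toList.contains c
  | c1 :: c2 :: rest =>
    let xs := c1 :: c2 :: rest
    isHexUpperAltGo (xs.take (xs.length / 2)) && isHexUpperAltGo (xs.drop (xs.length / 2))
termination_by xs => xs.length
decreasing_by
  · simp [List.length_take]; omega
  · simp [List.length_drop]; omega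

def isHexUpper_alt (string : String) : Bool := isHexUpperAltGo string.toList

-- ===== PRECONDITION & SPEC =====
def Spec_isHexUpper (string : String) (out : Bool) : Prop := out = isHexUpper_alt string
instance (string : String) (out : Bool) : Decidable (Spec_isHexUpper string out) := by unfold Spec_isHexUpper; infer_instance

-- ===== CLAIM (what is proved, stated in full; the proofs are below) =====
def Claim_equal_isHexUpper : Prop := ∀ (string : String), Dom_isHexUpper string → Spec_isHexUpper string (isHexUpper string)

-- ===== LEMMAS AND PROOFS =====

def pvHexOK (c : Char) : Bool := ('0' ≤ c ∧ c ≤ '9') ∨ ('A' ≤ c ∧ c ≤ 'F')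

theorem isHexUpperGo_eq_all (xs : List Char) : isHexUpperGo xs = xs.all pvHexOK := by
  induction xs with
  | nil => rfl
  | cons c rest ih =>
    simp only [isHexUpperGo, List.all_cons, pvHexOK]
    by_cases h1 : ('0' ≤ c ∧ c ≤ '9')
    · simp [h1, ih]
    · by_cases h2 : ('A' ≤ c ∧ c ≤ 'F')
      · simp [h1, h2, ih]
      · simp [h1, h2]

theorem mem_hexlist (c : Char) :
    c ∈ "0123456789ABCDEF".toList ↔ (('0' ≤ c ∧ c ≤ '9') ∨ ('A' ≤ c ∧ c ≤ 'F')) := by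
  have hval : ∀ d : Char, (c = d) ↔ c.toNat = d.toNat := by
    intro d
    constructor
    · rintro rfl; rfl
    · intro h; exact Char.ext (by
        have : c.val.toNat = d.val.toNat := h
        exact UInt32.toNat_inj.mp this)
  have hle : ∀ a b : Char, (a ≤ b) ↔ a.toNat ≤ b.toNat := by
    intro a b
    rw [Char.le_def, UInt32.le_iff_toNat_le]
    rfl
  simp only [show ("0123456789ABCDEF".toList) =
      ['0','1','2','3','4','5','6','7','8','9','A','B','C','D','E','F'] from rfl,
    List.mem_cons, List.not_mem_nil, or_false]
  rw [hval '0', hval '1', hval '2', hval '3', hval '4', hval '5', hval '6', hval '7',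
      hval '8', hval '9', hval 'A', hval 'B', hval 'C', hval 'D', hval 'E', hval 'F',
      hle c '9', hle '0' c, hle c 'F', hle 'A' c]
  simp only [show ('0' : Char).toNat = 48 from rfl, show ('1' : Char).toNat = 49 from rfl,
    show ('2' : Char).toNat = 50 from rfl, show ('3' : Char).toNat = 51 from rfl,
    show ('4' : Char).toNat = 52 from rfl, show ('5' : Char).toNat = 53 from rfl,
    show ('6' : Char).toNat = 54 from rfl, show ('7' : Char).toNat = 55 from rfl,
    show ('8' : Char).toNat = 56 from rfl, show ('9' : Char).toNat = 57 from rfl,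
    show ('A' : Char).toNat = 65 from rfl, show ('B' : Char).toNat = 66 from rfl,
    show ('C' : Char).toNat = 67 from rfl, show ('D' : Char).toNat = 68 from rfl,
    show ('E' : Char).toNat = 69 from rfl, show ('F' : Char).toNat = 70 from rfl]
  omega

theorem altGo_eq_all (xs : List Char) : isHexUpperAltGo xs = xs.all pvHexOK := by
  fun_induction isHexUpperAltGo xs with
  | case1 => rfl
  | case2 c =>
    simp only [List.all_cons, List.all_nil, Bool.and_true]
    rw [Bool.eq_iff_iff, List.contains_iff_mem, mem_hexlist]
    simp [pvHexOK]
  | case3 c1 c2 rest xs ih1 ih2 =>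
    rw [ih1, ih2, ← List.all_append, List.take_append_drop]

-- ===== VERDICT (by name: the statement is the Claim_ definition above) =====
theorem isHexUpper_spec : Claim_equal_isHexUpper := by
  intro string _
  unfold Spec_isHexUpper isHexUpper isHexUpper_alt
  rw [isHexUpperGo_eq_all, altGo_eq_all]
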